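-- pv_equiv track=rewrite | github.com/svalinn/ALARA | src/DataLib/fendl32B_retrofit/gendf_tools.py | emitted_particle_count
-- ===== SOURCE A (Python) =====
-- def emitted_particle_count(particle, emitted_particle_string):
--     """
--     Count emitted particles from a reaction given a target particle
--         and the particles produced in a neutron activation reaction.
--
--     Arguments:
--         particle (str): Name of the target particle produced in the reaction.
--             Options include n, p, alpha, d, t, and 3He, corresponding to
--             neutrons, protons, alpha particles, deuterons, tritons, and helium-3 nuclides.
--         emitted_particle_string (str): Particle product(s) of the neutron activation,
--             of the format 'p' for a single proton for example or '2n' for two neutrons etc.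
--
--     Returns:
--         number_str (int or None): Count of the target particle present in the product.
--             For particles not present, returns None rather than 0.
--     """
--
--     particle_index = emitted_particle_string.find(particle)
--     number_str = ''
--     for i in range(particle_index - 1, -1, -1):
--         if emitted_particle_string[i].isdigit():
--             number_str = emitted_particle_string[i] + number_str
--         else:
--             break
--
--     if number_str:
--         number_str = int(number_str)
--     elif particle in emitted_particle_string:
--         number_str = 1
--     else:
--         number_str = None
--
--     return number_str
-- ===== SOURCE B (Python) =====
-- def emitted_particle_count(particle, emitted_particle_string):
--     """Loop-free rewrite: early-return on absence, then peel the trailing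
--     digit run off the prefix with rstrip and one slice."""
--     idx = emitted_particle_string.find(particle)
--     if idx == -1:
--         return None
--     prefix = emitted_particle_string[:idx]
--     digits = prefix[len(prefix.rstrip('0123456789')):]
--     return int(digits) if digits else 1
-- ===== Notes on version B (the rewrite author's own statement) =====
-- stated objective: idiomatic
-- what changed: Replaces the backward character-by-character scan with break and the three-way branch chain by an early return on absence followed by rstrip('0123456789') plus one slice to peel the leading multiplier off the prefix - no explicit loop or string accumulation.
import Mathlib
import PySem

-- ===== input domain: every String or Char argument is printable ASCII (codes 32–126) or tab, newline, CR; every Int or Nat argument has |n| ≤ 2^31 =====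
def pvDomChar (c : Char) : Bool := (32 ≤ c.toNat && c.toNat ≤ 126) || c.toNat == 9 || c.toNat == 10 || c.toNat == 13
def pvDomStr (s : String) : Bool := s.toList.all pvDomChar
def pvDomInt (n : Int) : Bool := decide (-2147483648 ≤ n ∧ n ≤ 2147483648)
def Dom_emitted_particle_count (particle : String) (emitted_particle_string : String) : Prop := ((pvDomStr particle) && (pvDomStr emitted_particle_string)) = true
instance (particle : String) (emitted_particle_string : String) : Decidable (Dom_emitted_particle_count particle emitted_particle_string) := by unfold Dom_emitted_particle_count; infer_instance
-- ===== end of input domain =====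

-- B replaces A's backward digit-collecting loop and three-way branch chain by an
-- early return on absence plus rstrip('0123456789') and one slice (objective: idiomatic).

-- ===== PORT A =====
-- A's loop 'for i in range(particle_index - 1, -1, -1): if s[i].isdigit(): number_str = s[i] + number_str else: break',
-- transcribed as structural recursion on the count of remaining indices (i = n - 1 at each step).
def pvLoopA (cs : List Char) : Nat → List Char → List Char
  | 0, acc => acc
  | n+1, acc =>
    match PySem.List.pyGet? cs (n : Int) with
    | none => acc   -- unreachable: n is a valid index
    | some c => if PySem.Chars.isdigit c then pvLoopA cs n (c :: acc) else acc

def emitted_particle_count (particle : String) (emitted_particle_string : String) : Option Int :=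
  let particle_index := PySem.Str.find emitted_particle_string particle
  -- range(particle_index-1, -1, -1) visits particle_index indices when particle_index ≥ 0, none when it is -1
  let number_str := pvLoopA emitted_particle_string.toList particle_index.toNat []
  if number_str ≠ [] then PySem.Int.ofStr? (String.ofList number_str)  -- int(number_str); never fails on a nonempty digit string
  else if PySem.Str.isIn particle emitted_particle_string then some 1
  else none

-- ===== PORT B =====
def emitted_particle_count_alt (particle : String) (emitted_particle_string : String) : Option Int :=
  let idx := PySem.Str.find emitted_particle_string particle
  if idx = -1 then none
  else
    let pre := PySem.List.slice emitted_particle_string.toList none (some idx)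
    -- pre.rstrip('0123456789') ported by hand: drop the trailing run of ASCII digit characters
    -- (exact: the strip set is precisely the characters with PySem.Chars.isdigit = true)
    let stripped := (List.dropWhile PySem.Chars.isdigit pre.reverse).reverse
    let digits := PySem.List.slice pre (some (stripped.length : Int)) none
    if digits ≠ [] then PySem.Int.ofStr? (String.ofList digits)  -- int(digits); never fails on a nonempty digit string
    else some 1

-- ===== PRECONDITION & SPEC =====
def Spec_emitted_particle_count (particle : String) (emitted_particle_string : String) (out : Option Int) : Prop := out = emitted_particle_count_alt particle emitted_particle_string
instance (particle : String) (emitted_particle_string : String) (out : Option Int) : Decidable (Spec_emitted_particle_count particle emitted_particle_string out) := by unfold Spec_emitted_particle_count; infer_instance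

-- ===== CLAIM (what is proved, stated in full; the proofs are below) =====
def Claim_equal_emitted_particle_count : Prop := ∀ (particle : String) (emitted_particle_string : String), Dom_emitted_particle_count particle emitted_particle_string → Spec_emitted_particle_count particle emitted_particle_string (emitted_particle_count particle emitted_particle_string)

-- ===== LEMMAS AND PROOFS =====

-- A's loop collects exactly the trailing digit run of cs.take n (reversed takeWhile), prepended to acc.
theorem pvLoopA_eq (cs : List Char) (n : Nat) (hn : n ≤ cs.length) (acc : List Char) :
    pvLoopA cs n acc = (List.takeWhile PySem.Chars.isdigit (cs.take n).reverse).reverse ++ acc := by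
  induction n generalizing acc with
  | zero => simp [pvLoopA]
  | succ n ih =>
    have hlt : n < cs.length := hn
    have hget : PySem.List.pyGet? cs (n : Int) = some cs[n] := by
      simp [PySem.List.pyGet?, PySem.List.pyIdx?, hlt]
    have htake : cs.take (n+1) = cs.take n ++ [cs[n]] := by
      rw [List.take_add_one]
      simp [hlt]
    rw [pvLoopA, hget, htake]
    dsimp only
    by_cases hd : PySem.Chars.isdigit cs[n]
    · rw [if_pos hd, ih (Nat.le_of_lt hlt), List.reverse_append]
      simp [hd]
    · rw [if_neg hd, List.reverse_append]
      simp [hd]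

-- dropping the rstripped part of a list leaves exactly the reversed trailing run
theorem drop_stripped (p : Char → Bool) (l : List Char) :
    l.drop ((List.dropWhile p l.reverse).reverse).length
      = (List.takeWhile p l.reverse).reverse := by
  have hsplit : l = (List.dropWhile p l.reverse).reverse ++ (List.takeWhile p l.reverse).reverse := by
    rw [← List.reverse_append, List.takeWhile_append_dropWhile, List.reverse_reverse]
  conv_lhs => rw [hsplit]
  rw [List.drop_append_of_le_length (by simp)]
  simp

theorem emitted_particle_count_eq_alt (particle s : String) :
    emitted_particle_count particle s = emitted_particle_count_alt particle s := by
  unfold emitted_particle_count emitted_particle_count_alt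
  simp only [PySem.Str.find_eq, PySem.Str.isIn_eq]
  set f := PySem.Chars.find s.toList particle.toList with hf
  rcases Int.lt_or_le f 0 with hneg | hpos
  · -- not found: f = -1
    have hm1 : f = -1 := le_antisymm (by omega) (PySem.Chars.neg_one_le_find _ _)
    have hin : PySem.Chars.isIn particle.toList s.toList = false := by
      rw [PySem.Chars.isIn_eq_false_iff, ← PySem.Chars.find_eq_neg_one_iff, ← hf, hm1]
    simp [hm1, pvLoopA, hin]
  · -- found at index f ≥ 0
    have hne : f ≠ -1 := by omega
    have hlen : f ≤ (s.toList.length : Int) := PySem.Chars.find_le_length _ _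
    have htoNat : f = ((f.toNat : Nat) : Int) := by omega
    have hle : f.toNat ≤ s.toList.length := by omega
    have hin : PySem.Chars.isIn particle.toList s.toList = true := by
      rw [PySem.Chars.isIn_iff_infix, ← PySem.Chars.find_ne_neg_one_iff, ← hf]; exact hne
    have hslice : PySem.List.slice s.toList none (some f) = s.toList.take f.toNat := by
      rw [htoNat, PySem.List.slice_to]; simp
    have hslice2 : ∀ (l : List Char) (k : Nat),
        PySem.List.slice l (some (k : Int)) none = l.drop k := fun l k => by
      rw [PySem.List.slice_from]
      · simp
      · exact Int.natCast_nonneg k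
    rw [pvLoopA_eq s.toList f.toNat hle []]
    rw [if_neg hne, hslice, hslice2, drop_stripped]
    simp [hin]

-- ===== VERDICT (by name: the statement is the Claim_ definition above) =====
theorem emitted_particle_count_spec : Claim_equal_emitted_particle_count := by
  intro particle s _
  unfold Spec_emitted_particle_count
  exact emitted_particle_count_eq_alt particle s
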